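-- pv_equiv track=rewrite | github.com/autwk/TA_FYA | TA_F11.py | generate_language_with_derivations
-- ===== SOURCE A (Python) =====
-- def generate_language_with_derivations(productions, start_symbol='S', max_depth=6):
--     # Словарь для хранения продукций
--     grammar = {}
--     for production in productions:
--         left, right = production.split('->')
--         if right == 'Л': right = ''
--         if left in grammar:
--             grammar[left].append(right)
--         else:
--             grammar[left] = [right]
--
--     # Функция для рекурсивной генерации строк с размеченными выводами
--     def expand_with_derivation(current, derivation, depth):
--         if depth == 0:
--             return []  # Если достигли глубины, возвращаем пустой список
--
--         # Если в текущей цепочке нет нетерминалов, возвращаем её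
--         if all(c not in grammar for c in current):
--             return [(current, derivation + [current])]  # Добавляем конечную цепочку
--
--         derivations = []
--         for i, symbol in enumerate(current):
--             if symbol in grammar:  # Если символ является нетерминалом
--                 for production in grammar[symbol]:
--                     # Заменяем символ на продукцию
--                     new_string = current[:i] + production + current[i + 1:]
--                     # Добавляем текущую цепочку с разметкой в вывод
--                     marked_string = (
--                         current[:i] + f"*{symbol}*" + current[i + 1:]
--                     )
--                     derivations.extend(
--                         expand_with_derivation(new_string, derivation + [marked_string], depth - 1)
--                     )
--
--         return derivations
--
--     # Генерация строк с максимальной глубиной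
--     language_derivations = []
--     for d in range(1, max_depth + 1):  # Начинаем с глубины 1
--         if d == 1:
--             # Для первой итерации добавляем только начальный символ с разметкой
--             language_derivations.extend(
--                 expand_with_derivation(start_symbol, [f"*{start_symbol}*"], d)
--             )
--         else:
--             language_derivations.extend(
--                 expand_with_derivation(start_symbol, [], d)
--             )
--
--     return language_derivations
-- ===== SOURCE B (Python) =====
-- def generate_language_with_derivations(productions, start_symbol='S', max_depth=6):
--     # Grammar as a dict of left -> list of right-hand sides (setdefault grouping)
--     grammar = {}
--     for production in productions:
--         left, right = production.split('->')
--         grammar.setdefault(left, []).append('' if right == 'Л' else right)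
--
--     # One full-depth search.  Each result carries only its own derivation tail;
--     # nonterminal positions are collected first, a sentence is emitted when there
--     # are none, and a frame with nonterminals at depth 1 is a dead end.
--     def expand(current, depth):
--         nts = [(i, c) for i, c in enumerate(current) if c in grammar]
--         if not nts:
--             return [(current, [current])]
--         if depth == 1:
--             return []
--         return [(s, [current[:i] + '*' + c + '*' + current[i + 1:]] + tail)
--                 for i, c in nts
--                 for prod in grammar[c]
--                 for s, tail in expand(current[:i] + prod + current[i + 1:], depth - 1)]
--
--     # A budget-d search emits exactly the full-depth results whose tail has
--     # length <= d, in the same order; so filter the single search per depth.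
--     full = expand(start_symbol, max_depth) if max_depth >= 1 else []
--     out = []
--     for d in range(1, max_depth + 1):
--         prefix = ['*' + start_symbol + '*'] if d == 1 else []
--         out += [(s, prefix + tail) for s, tail in full if len(tail) <= d]
--     return out
-- ===== Notes on version B (the rewrite author's own statement) =====
-- stated objective: alternative
-- what changed: B groups the grammar with dict.setdefault, replaces the recursive helper by one that precomputes the list of nonterminal positions and returns derivation tails (no threaded accumulator, comprehension instead of extend loops, dead-end test at depth 1), runs that search ONCE at full depth, and produces each depth's chunk by filtering the single result list on tail length, preserving the exact DFS emission order, instead of A's re-running the depth-limited recursion for every d in range(1, max_depth+1).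
-- outside the precondition, e.g. on generate_language_with_derivations(['S->a->b'], 'S', 2): A raises ValueError, B raises ValueError
import Mathlib
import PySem

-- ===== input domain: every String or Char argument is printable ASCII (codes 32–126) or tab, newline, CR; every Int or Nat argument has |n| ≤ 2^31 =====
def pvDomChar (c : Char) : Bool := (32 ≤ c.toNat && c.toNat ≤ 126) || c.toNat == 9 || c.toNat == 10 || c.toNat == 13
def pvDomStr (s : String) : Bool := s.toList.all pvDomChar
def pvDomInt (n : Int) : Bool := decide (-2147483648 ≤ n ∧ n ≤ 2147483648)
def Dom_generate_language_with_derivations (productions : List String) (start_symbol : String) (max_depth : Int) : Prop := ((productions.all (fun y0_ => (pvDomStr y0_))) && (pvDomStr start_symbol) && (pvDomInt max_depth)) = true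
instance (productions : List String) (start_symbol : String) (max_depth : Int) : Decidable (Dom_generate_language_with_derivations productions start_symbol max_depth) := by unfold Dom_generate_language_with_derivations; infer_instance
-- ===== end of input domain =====

-- B replaces A's per-depth re-runs of the recursive search by ONE full-depth search that
-- precomputes nonterminal positions and carries only derivation tails, filtered per depth
-- (alternative decomposition; the grammar dict is grouped via setdefault).


-- ===== PORT A =====
def pvGrammar (productions : List String) : PySem.Dict String (List String) :=
  productions.foldl (fun grammar production =>
    match PySem.Str.split? production "->" with
    | some [left, right] =>
      let right := if right == "Л" then "" else right
      if grammar.contains left then grammar.modify left [] (fun v => v ++ [right])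
      else grammar.insert left [right]
    | _ => grammar) PySem.Dict.empty

def pvExpandA (g : PySem.Dict String (List String)) : List Char → List String → Nat → List (String × List String)
  | _, _, 0 => []
  | current, derivation, depth+1 =>
    if current.all (fun c => !(g.contains (String.ofList [c]))) then
      [(String.ofList current, derivation ++ [String.ofList current])]
    else
      (PySem.List.enumerate current).foldl (fun acc is =>
        if g.contains (String.ofList [is.2]) then
          (g.getD (String.ofList [is.2]) []).foldl (fun acc production =>
            acc ++ pvExpandA g
              (current.take is.1.toNat ++ production.toList ++ current.drop (is.1.toNat + 1))
              (derivation ++ [String.ofList (current.take is.1.toNat ++ '*' :: is.2 :: '*' :: current.drop (is.1.toNat + 1))])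
              depth) acc
        else acc) []

def generate_language_with_derivations (productions : List String) (start_symbol : String) (max_depth : Int) : List (String × List String) :=
  let grammar := pvGrammar productions
  (PySem.List.pyRange 1 (max_depth + 1) 1).foldl (fun acc d =>
    if d == 1 then
      acc ++ pvExpandA grammar start_symbol.toList [String.ofList ('*' :: start_symbol.toList ++ ['*'])] d.toNat
    else
      acc ++ pvExpandA grammar start_symbol.toList [] d.toNat) []

-- ===== PORT B =====
-- grammar.setdefault(left, []).append('' if right == 'Л' else right)
def pvGrammarB (productions : List String) : PySem.Dict String (List String) :=
  productions.foldl (fun grammar production =>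
    match PySem.Str.split? production "->" with
    | some [left, right] =>
      (grammar.setdefault left []).modify left []
        (fun v => v ++ [if right == "Л" then "" else right])
    | _ => grammar) PySem.Dict.empty

-- nts = [(i, c) for i, c in enumerate(current) if c in grammar]; emit when nts is empty,
-- dead end when depth == 1, else one triple comprehension.  The 0 case is never reached:
-- the entry point only calls with depth ≥ 1 and the recursion keeps depth ≥ 1.
def pvExpandB (g : PySem.Dict String (List String)) : List Char → Nat → List (String × List String)
  | _, 0 => []
  | current, depth+1 =>
    let nts := (PySem.List.enumerate current).filter (fun ic => g.contains (String.ofList [ic.2]))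
    if nts.isEmpty then
      [(String.ofList current, [String.ofList current])]
    else if depth = 0 then
      []
    else
      nts.flatMap (fun ic =>
        (g.getD (String.ofList [ic.2]) []).flatMap (fun prod =>
          (pvExpandB g (current.take ic.1.toNat ++ prod.toList ++ current.drop (ic.1.toNat + 1)) depth).map
            (fun st => (st.1, String.ofList (current.take ic.1.toNat ++ '*' :: ic.2 :: '*' :: current.drop (ic.1.toNat + 1)) :: st.2))))

def generate_language_with_derivations_alt (productions : List String) (start_symbol : String) (max_depth : Int) : List (String × List String) :=
  let grammar := pvGrammarB productions
  let full := if max_depth ≥ 1 then pvExpandB grammar start_symbol.toList max_depth.toNat else []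
  (PySem.List.pyRange 1 (max_depth + 1) 1).foldl (fun out d =>
    out ++ (full.filter (fun st => (st.2.length : Int) ≤ d)).map
      (fun st => (st.1, (if d == 1 then [String.ofList ('*' :: start_symbol.toList ++ ['*'])] else []) ++ st.2))) []

-- ===== PRECONDITION & SPEC =====
-- Pre_ excludes exactly the inputs with a production not containing exactly one '->',
-- on which A's tuple unpacking of production.split('->') raises ValueError.
def Pre_generate_language_with_derivations (productions : List String) (start_symbol : String) (max_depth : Int) : Prop :=
  ∀ p ∈ productions, ((PySem.Str.split? p "->").getD []).length = 2
instance (productions : List String) (start_symbol : String) (max_depth : Int) : Decidable (Pre_generate_language_with_derivations productions start_symbol max_depth) := by unfold Pre_generate_language_with_derivations; infer_instance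

def pvWitness_generate_language_with_derivations : List String × String × Int := (["S->aS", "S->a"], "S", 2)

def Spec_generate_language_with_derivations (productions : List String) (start_symbol : String) (max_depth : Int) (out : List (String × List String)) : Prop := out = generate_language_with_derivations_alt productions start_symbol max_depth
instance (productions : List String) (start_symbol : String) (max_depth : Int) (out : List (String × List String)) : Decidable (Spec_generate_language_with_derivations productions start_symbol max_depth out) := by unfold Spec_generate_language_with_derivations; infer_instance

-- ===== CLAIM (what is proved, stated in full; the proofs are below) =====
def Claim_equal_generate_language_with_derivations : Prop := ∀ (productions : List String) (start_symbol : String) (max_depth : Int), Dom_generate_language_with_derivations productions start_symbol max_depth → Pre_generate_language_with_derivations productions start_symbol max_depth → Spec_generate_language_with_derivations productions start_symbol max_depth (generate_language_with_derivations productions start_symbol max_depth)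

-- ===== LEMMAS AND PROOFS =====

-- the two grammar-building loops produce the same dict
theorem pvGrammarB_eq (productions : List String) : pvGrammarB productions = pvGrammar productions := by
  unfold pvGrammarB pvGrammar
  congr 1
  funext g p
  cases h : PySem.Str.split? p "->" with
  | none => rfl
  | some l =>
    match l with
    | [] => rfl
    | [_] => rfl
    | [left, right] =>
      simp only
      cases hc : g.contains left with
      | true => rw [PySem.Dict.setdefault_of_contains g ([] : List String) hc]; simp
      | false =>
        rw [PySem.Dict.setdefault_of_not_contains g ([] : List String) hc]
        simp [PySem.Dict.modify, PySem.Dict.getD_insert_self, PySem.Dict.insert_insert_self]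
    | _ :: _ :: _ :: _ => rfl

-- the 'if symbol in grammar: for production in grammar[symbol]: out.extend(...)' loop shape
theorem pv_foldl_if_flatMap {α β γ : Type} (c : α → Bool) (ps : α → List β) (F : α → β → List γ)
    (l : List α) (acc : List γ) :
    l.foldl (fun acc x => if c x then (ps x).foldl (fun a p => a ++ F x p) acc else acc) acc
    = acc ++ l.flatMap (fun x => if c x then (ps x).flatMap (F x) else []) := by
  have hbody : (fun (acc : List γ) (x : α) =>
        if c x then (ps x).foldl (fun a p => a ++ F x p) acc else acc)
      = fun acc x => acc ++ (if c x then (ps x).flatMap (F x) else []) := by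
    funext acc x
    cases c x
    · simp
    · simp [List.flatMap_def]
  rw [hbody, PySem.List.foldl_append_eq_flatMap]

theorem pv_flatMap_if_filter {α γ : Type} (c : α → Bool) (F : α → List γ) (l : List α) :
    l.flatMap (fun x => if c x then F x else []) = (l.filter c).flatMap F := by
  induction l with
  | nil => rfl
  | cons x l ih =>
    cases h : c x <;> simp [h, ih]

-- A's 'all(c not in grammar for c in current)' test is B's 'not nts'
theorem pv_nts_empty (p : Char → Bool) (cur : List Char) (s : Int) :
    ((PySem.List.enumerate cur s).filter (fun ic => p ic.2)).isEmpty
      = cur.all (fun c => !(p c)) := by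
  induction cur generalizing s with
  | nil => rfl
  | cons c cur ih =>
    rw [PySem.List.enumerate_cons]
    cases h : p c <;> simp [h, ih]

theorem pvExpandA_succ (g : PySem.Dict String (List String)) (cur : List Char) (der : List String) (d : Nat) :
    pvExpandA g cur der (d+1) =
      if cur.all (fun c => !(g.contains (String.ofList [c]))) then
        [(String.ofList cur, der ++ [String.ofList cur])]
      else
        (PySem.List.enumerate cur).flatMap (fun is =>
          if g.contains (String.ofList [is.2]) then
            (g.getD (String.ofList [is.2]) []).flatMap (fun p => pvExpandA g
              (cur.take is.1.toNat ++ p.toList ++ cur.drop (is.1.toNat + 1))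
              (der ++ [String.ofList (cur.take is.1.toNat ++ '*' :: is.2 :: '*' :: cur.drop (is.1.toNat + 1))])
              d)
          else []) := by
  rw [pvExpandA]
  split
  · rfl
  · rw [pv_foldl_if_flatMap]; simp

theorem pvExpandB_succ (g : PySem.Dict String (List String)) (cur : List Char) (D : Nat) :
    pvExpandB g cur (D+1) =
      if ((PySem.List.enumerate cur).filter (fun ic => g.contains (String.ofList [ic.2]))).isEmpty then
        [(String.ofList cur, [String.ofList cur])]
      else if D = 0 then
        []
      else
        ((PySem.List.enumerate cur).filter (fun ic => g.contains (String.ofList [ic.2]))).flatMap (fun ic =>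
          (g.getD (String.ofList [ic.2]) []).flatMap (fun prod =>
            (pvExpandB g (cur.take ic.1.toNat ++ prod.toList ++ cur.drop (ic.1.toNat + 1)) D).map
              (fun st => (st.1, String.ofList (cur.take ic.1.toNat ++ '*' :: ic.2 :: '*' :: cur.drop (ic.1.toNat + 1)) :: st.2)))) := by
  rw [pvExpandB]

-- every derivation tail B emits is nonempty
theorem pvExpandB_tail_ne (g : PySem.Dict String (List String)) (cur : List Char) (D : Nat) :
    ∀ p ∈ pvExpandB g cur D, 1 ≤ p.2.length := by
  induction D generalizing cur with
  | zero => simp [pvExpandB]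
  | succ D ih =>
    rw [pvExpandB_succ]
    split
    · intro p hp
      simp only [List.mem_singleton] at hp
      subst hp; simp
    · split
      · simp
      · intro p hp
        simp only [List.mem_flatMap, List.mem_map] at hp
        obtain ⟨ic, _, q, _, st, _, rfl⟩ := hp
        simp

theorem pv_filter_map_flatMap {α β γ : Type} (l : List α) (f : α → List β) (q : β → Bool) (m : β → γ) :
    ((l.flatMap f).filter q).map m = l.flatMap (fun x => ((f x).filter q).map m) := by
  induction l with
  | nil => simp
  | cons x l ih => simp [List.filter_append, ih]

-- KEY: a budget-d search of A equals B's budget-D (D ≥ d) search filtered to tails of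
-- length ≤ d, with the accumulated derivation prefix prepended
theorem pvExpand_key (g : PySem.Dict String (List String)) :
    ∀ (D d : Nat), d ≤ D → ∀ (cur : List Char) (der : List String),
      pvExpandA g cur der d =
        ((pvExpandB g cur D).filter (fun st => decide (st.2.length ≤ d))).map
          (fun st => (st.1, der ++ st.2)) := by
  intro D
  induction D with
  | zero =>
    intro d hd cur der
    have : d = 0 := by omega
    subst this
    simp [pvExpandA, pvExpandB]
  | succ D ih =>
    intro d hd cur der
    cases d with
    | zero =>
      have h0 : (pvExpandB g cur (D+1)).filter (fun st => decide (st.2.length ≤ 0)) = [] := by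
        rw [List.filter_eq_nil_iff]
        intro p hp
        have h1 := pvExpandB_tail_ne g cur (D+1) p hp
        intro hq
        rw [decide_eq_true_eq] at hq
        omega
      have hA : pvExpandA g cur der 0 = [] := by rw [pvExpandA]
      rw [hA, h0]
      rfl
    | succ s =>
      rw [pvExpandA_succ, pvExpandB_succ]
      rw [← pv_nts_empty (fun c => g.contains (String.ofList [c])) cur 0]
      cases hnts : ((PySem.List.enumerate cur 0).filter (fun ic => g.contains (String.ofList [ic.2]))).isEmpty
      · rw [if_neg (by simp [hnts]), if_neg (by simp [hnts])]
        rw [pv_flatMap_if_filter]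
        by_cases hD : D = 0
        · subst hD
          have hs : s = 0 := by omega
          subst hs
          simp [pvExpandA]
        · rw [if_neg hD]
          rw [pv_filter_map_flatMap]
          congr 1
          funext ic
          rw [pv_filter_map_flatMap]
          congr 1
          funext p
          rw [List.filter_map, List.map_map]
          rw [ih s (by omega)]
          congr 1
          · funext st
            simp [Function.comp]
          · apply List.filter_congr
            intro st _
            simp only [Function.comp_apply, List.length_cons, decide_eq_decide]
            omega
      · rw [if_pos (by simp [hnts]), if_pos (by simp [hnts])]
        simp

-- ===== VERDICT (by name: the statement is the Claim_ definition above) =====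
theorem generate_language_with_derivations_spec : Claim_equal_generate_language_with_derivations := by
  intro productions start_symbol max_depth _ _
  unfold Spec_generate_language_with_derivations
  simp only [generate_language_with_derivations, generate_language_with_derivations_alt]
  rw [pvGrammarB_eq]
  apply PySem.List.foldl_congr_mem
  intro acc d hd
  rw [PySem.List.mem_pyRange_one] at hd
  have hmd : max_depth ≥ 1 := by omega
  rw [if_pos hmd]
  have hdt : d.toNat ≤ max_depth.toNat := by omega
  have hfe : (pvExpandB (pvGrammar productions) start_symbol.toList max_depth.toNat).filter
        (fun st => decide ((st.2.length : Int) ≤ d)) =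
      (pvExpandB (pvGrammar productions) start_symbol.toList max_depth.toNat).filter
        (fun st => decide (st.2.length ≤ d.toNat)) := by
    apply List.filter_congr
    intro st _
    simp only [decide_eq_decide]
    omega
  rw [hfe]
  cases hif : (d == (1 : Int))
  · simp only [Bool.false_eq_true, if_false]
    congr 1
    exact pvExpand_key (pvGrammar productions) max_depth.toNat d.toNat hdt start_symbol.toList []
  · have hd1 : d = 1 := eq_of_beq hif
    subst hd1
    simp only [if_true]
    congr 1
    exact pvExpand_key (pvGrammar productions) max_depth.toNat ((1 : Int)).toNat hdt start_symbol.toList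
      [String.ofList ('*' :: start_symbol.toList ++ ['*'])]
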